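-- pv_equiv track=rewrite | github.com/ParkerWilliams/GraphVerse | cleanup_archive_2024_08_31/test_repeater_extension.py | needs_repeater_extension
-- ===== SOURCE A (Python) =====
-- def needs_repeater_extension(walk, repeaters):
--     """
--     Check if a walk needs extension to complete incomplete repeater cycles.
--
--     Args:
--         walk: The current walk
--         repeaters: Dict of {repeater_node: k_value}
--
--     Returns:
--         List of (repeater_node, k_value) that need completion
--     """
--     incomplete_repeaters = []
--
--     for repeater_node, k_value in repeaters.items():
--         if repeater_node in walk:
--             positions = [i for i, x in enumerate(walk) if x == repeater_node]
--
--             # Check if last occurrence is incomplete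
--             if len(positions) >= 1:
--                 last_pos = positions[-1]
--
--                 # If repeater appears only once, it's incomplete
--                 if len(positions) == 1:
--                     incomplete_repeaters.append((repeater_node, k_value))
--
--                 # If last occurrence is too close to end to complete a cycle
--                 elif len(positions) >= 2:
--                     second_last_pos = positions[-2]
--                     nodes_between_last_cycle = last_pos - second_last_pos - 1
--
--                     # If the last cycle is incomplete
--                     if nodes_between_last_cycle != k_value:
--                         incomplete_repeaters.append((repeater_node, k_value))
--
--     return incomplete_repeaters
-- ===== SOURCE B (Python) =====
-- def needs_repeater_extension(walk, repeaters):
--     # One pass over walk recording (second-last, last) occurrence index per node,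
--     # then a constant-time check per repeater.
--     occ = {}
--     for i, x in enumerate(walk):
--         prev = occ.get(x)
--         occ[x] = (None if prev is None else prev[1], i)
--     incomplete = []
--     for node, k in repeaters.items():
--         info = occ.get(node)
--         if info is None:
--             continue
--         second_last, last = info
--         if second_last is None or last - second_last - 1 != k:
--             incomplete.append((node, k))
--     return incomplete
-- ===== Notes on version B (the rewrite author's own statement) =====
-- stated objective: faster
-- what changed: Instead of scanning the whole walk per repeater to build its full position list, B makes one pass over the walk recording only the last two occurrence indices of each node in a dict, then checks each repeater in O(1).
import Mathlib
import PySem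

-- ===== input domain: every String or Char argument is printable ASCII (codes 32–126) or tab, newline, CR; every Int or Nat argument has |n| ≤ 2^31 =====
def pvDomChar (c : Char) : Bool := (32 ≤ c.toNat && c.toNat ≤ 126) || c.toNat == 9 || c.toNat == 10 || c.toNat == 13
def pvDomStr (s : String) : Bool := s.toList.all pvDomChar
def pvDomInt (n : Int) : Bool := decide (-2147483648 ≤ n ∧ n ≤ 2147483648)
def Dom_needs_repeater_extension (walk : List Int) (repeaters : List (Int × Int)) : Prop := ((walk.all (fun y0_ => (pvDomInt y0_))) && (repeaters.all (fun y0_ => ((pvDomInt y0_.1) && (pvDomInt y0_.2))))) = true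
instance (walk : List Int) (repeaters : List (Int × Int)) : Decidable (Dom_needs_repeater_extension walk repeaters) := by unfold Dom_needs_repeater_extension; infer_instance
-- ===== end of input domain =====

-- B replaces A's per-repeater scan of the walk by a single pass over the walk recording the
-- last two occurrence positions of each node in a dict (O(n + R) instead of O(R·n)).

-- ===== PORT A =====
def needs_repeater_extension (walk : List Int) (repeaters : List (Int × Int)) : List (Int × Int) :=
  repeaters.foldl (fun incomplete_repeaters p =>
    if p.1 ∈ walk then
      let positions := ((PySem.List.enumerate walk 0).filter (fun q => q.2 == p.1)).map (·.1)
      if 1 ≤ positions.length then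
        if positions.length = 1 then incomplete_repeaters ++ [(p.1, p.2)]
        else if 2 ≤ positions.length then
          let last_pos := (PySem.List.pyGet? positions (-1)).getD 0
          let second_last_pos := (PySem.List.pyGet? positions (-2)).getD 0
          let nodes_between_last_cycle := last_pos - second_last_pos - 1
          if nodes_between_last_cycle ≠ p.2 then incomplete_repeaters ++ [(p.1, p.2)]
          else incomplete_repeaters
        else incomplete_repeaters
      else incomplete_repeaters
    else incomplete_repeaters) []

-- ===== PORT B =====
-- occ[x] = (second-last occurrence index of x, or none; last occurrence index of x)
def pvOcc (walk : List Int) : PySem.Dict Int (Option Int × Int) :=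
  (PySem.List.enumerate walk 0).foldl
    (fun occ p => occ.insert p.2 ((occ.get? p.2).map (·.2), p.1)) PySem.Dict.empty

def needs_repeater_extension_alt (walk : List Int) (repeaters : List (Int × Int)) : List (Int × Int) :=
  let occ := pvOcc walk
  repeaters.foldl (fun incomplete p =>
    match occ.get? p.1 with
    | none => incomplete
    | some (second_last, last) =>
      match second_last with
      | none => incomplete ++ [(p.1, p.2)]
      | some s => if last - s - 1 ≠ p.2 then incomplete ++ [(p.1, p.2)] else incomplete) []

-- ===== PRECONDITION & SPEC =====
def Spec_needs_repeater_extension (walk : List Int) (repeaters : List (Int × Int)) (out : List (Int × Int)) : Prop := out = needs_repeater_extension_alt walk repeaters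
instance (walk : List Int) (repeaters : List (Int × Int)) (out : List (Int × Int)) : Decidable (Spec_needs_repeater_extension walk repeaters out) := by unfold Spec_needs_repeater_extension; infer_instance

-- ===== CLAIM (what is proved, stated in full; the proofs are below) =====
def Claim_equal_needs_repeater_extension : Prop := ∀ (walk : List Int) (repeaters : List (Int × Int)), Dom_needs_repeater_extension walk repeaters → Spec_needs_repeater_extension walk repeaters (needs_repeater_extension walk repeaters)

-- ===== LEMMAS AND PROOFS =====

-- A's occurrence-position list for `node` in `walk`, enumeration starting at s
def pvPositions (walk : List Int) (s node : Int) : List Int :=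
  ((PySem.List.enumerate walk s).filter (fun q => q.2 == node)).map (·.1)

-- what B's dict holds for a node whose previous entry was `prev`, after the occurrences `ps`
def pvCombine (prev : Option (Option Int × Int)) (ps : List Int) : Option (Option Int × Int) :=
  match ps.getLast? with
  | none => prev
  | some l => some ((ps.dropLast.getLast?).or (prev.map (·.2)), l)

lemma pvPositions_cons (x : Int) (xs : List Int) (s node : Int) :
    pvPositions (x :: xs) s node
      = (if x == node then [s] else []) ++ pvPositions xs (s + 1) node := by
  simp [pvPositions, PySem.List.enumerate_cons]
  split_ifs with h <;> simp [h]

lemma pvGetLast?_cons_or (a : Int) (l : List Int) :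
    (a :: l).getLast? = l.getLast?.or (some a) := by
  cases l with
  | nil => simp
  | cons c u =>
    rw [List.getLast?_cons_cons]
    cases hg : (c :: u).getLast? with
    | none => simp at hg
    | some v => simp

lemma pvCombine_cons (prev : Option (Option Int × Int)) (s : Int) (ps : List Int) :
    pvCombine prev (s :: ps) = pvCombine (some (prev.map (·.2), s)) ps := by
  cases ps with
  | nil => simp [pvCombine]
  | cons b t =>
    cases hg : (b :: t).getLast? with
    | none => simp at hg
    | some l =>
      simp only [pvCombine, List.getLast?_cons_cons, hg, List.dropLast_cons₂,
        pvGetLast?_cons_or, Option.map_some]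
      rw [Option.or_assoc]
      simp

lemma pvOcc_fold (xs : List Int) : ∀ (s : Int) (d : PySem.Dict Int (Option Int × Int)) (node : Int),
    ((PySem.List.enumerate xs s).foldl
      (fun occ p => occ.insert p.2 ((occ.get? p.2).map (·.2), p.1)) d).get? node
      = pvCombine (d.get? node) (pvPositions xs s node) := by
  induction xs with
  | nil => intro s d node; simp [pvPositions, pvCombine, PySem.List.enumerate_nil]
  | cons x t ih =>
    intro s d node
    rw [PySem.List.enumerate_cons, List.foldl_cons, ih, pvPositions_cons]
    by_cases hx : x = node
    · subst hx
      simp [PySem.Dict.get?_insert_self, pvCombine_cons]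
    · have hb : (x == node) = false := by simp [hx]
      simp [hb, PySem.Dict.get?_insert_of_ne _ _ (fun h => hx h.symm)]

lemma pvOcc_get (walk : List Int) (node : Int) :
    (pvOcc walk).get? node = pvCombine none (pvPositions walk 0 node) := by
  simpa using pvOcc_fold walk 0 PySem.Dict.empty node

lemma pvPositions_eq_nil (walk : List Int) (s node : Int) :
    pvPositions walk s node = [] ↔ node ∉ walk := by
  induction walk generalizing s with
  | nil => simp [pvPositions, PySem.List.enumerate_nil]
  | cons x t ih =>
    rw [pvPositions_cons]
    by_cases hx : x = node
    · simp [hx]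
    · have hb : (x == node) = false := by simp [hx]
      simp [hb, ih, Ne.symm hx]

lemma pvBranch_eq (walk : List Int) (p : Int × Int) (acc : List (Int × Int)) :
    (if p.1 ∈ walk then
      let positions := pvPositions walk 0 p.1
      if 1 ≤ positions.length then
        if positions.length = 1 then acc ++ [(p.1, p.2)]
        else if 2 ≤ positions.length then
          let last_pos := (PySem.List.pyGet? positions (-1)).getD 0
          let second_last_pos := (PySem.List.pyGet? positions (-2)).getD 0
          let nodes_between_last_cycle := last_pos - second_last_pos - 1
          if nodes_between_last_cycle ≠ p.2 then acc ++ [(p.1, p.2)]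
          else acc
        else acc
      else acc
    else acc)
    =
    (match (pvOcc walk).get? p.1 with
    | none => acc
    | some (second_last, last) =>
      match second_last with
      | none => acc ++ [(p.1, p.2)]
      | some s => if last - s - 1 ≠ p.2 then acc ++ [(p.1, p.2)] else acc) := by
  rw [pvOcc_get]
  cases hps : pvPositions walk 0 p.1 with
  | nil =>
    have hm : p.1 ∉ walk := (pvPositions_eq_nil walk 0 p.1).1 hps
    simp [hm, pvCombine]
  | cons a t =>
    have hmem : p.1 ∈ walk := by
      by_contra hm
      have h0 := (pvPositions_eq_nil walk 0 p.1).2 hm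
      rw [hps] at h0
      simp at h0
    cases t with
    | nil => simp [hmem, pvCombine]
    | cons b u =>
      have hlast : PySem.List.pyGet? (a :: b :: u) (-1) = (a :: b :: u).getLast? :=
        PySem.List.pyGet?_neg_one _
      have hsec : PySem.List.pyGet? (a :: b :: u) (-2)
          = (a :: b :: u)[(a :: b :: u).length - 2]? :=
        PySem.List.pyGet?_neg_ofNat _ 2 (by omega) (by simp)
      have hdl : ((a :: b :: u).dropLast).getLast? = (a :: b :: u)[(a :: b :: u).length - 2]? := by
        rw [List.getLast?_eq_getElem?, List.getElem?_dropLast]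
        simp
      cases hg : (a :: b :: u).getLast? with
      | none => simp at hg
      | some l =>
        cases hd : ((a :: b :: u).dropLast).getLast? with
        | none =>
          rw [List.dropLast_cons₂, pvGetLast?_cons_or] at hd
          simp at hd
        | some s2 =>
          have hseceq : PySem.List.pyGet? (a :: b :: u) (-2) = some s2 := by
            rw [hsec, ← hdl, hd]
          have hlasteq : PySem.List.pyGet? (a :: b :: u) (-1) = some l := by rw [hlast, hg]
          simp only [hmem, if_true, pvCombine, hg, hd, hseceq, hlasteq]
          simp [Option.or]

-- ===== VERDICT (by name: the statement is the Claim_ definition above) =====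
theorem needs_repeater_extension_spec : Claim_equal_needs_repeater_extension := by
  intro walk repeaters _
  show needs_repeater_extension walk repeaters = needs_repeater_extension_alt walk repeaters
  unfold needs_repeater_extension needs_repeater_extension_alt
  congr 1
  funext acc p
  exact pvBranch_eq walk p acc
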